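-- pv_equiv track=rewrite | github.com/WMRGL/VariantDatabase | VariantDatabase/parsers/vcf_parser.py | worst_consequence
-- ===== SOURCE A (Python) =====
-- def worst_consequence(transcript_data):
-- 	"""
-- 	Looks through all the transcripts for a variant and returns the worst_consequence. e.g. if the consequence in one
-- 	transcript is stop_gained and in the other missense_variant then the function will return stop_gained.
--
-- 	Input:
--
-- 	transcript_data = The dictionary containing all the transcript_data - see create_master_list()
--
-- 	Output:
--
-- 	vep_consequences[worst] = The worst VEP consequence for that variant.
--
--
-- 	See URL below for more detail:
--
-- 	https://www.ensembl.org/info/genome/variation/predicted_data.html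
--
--
-- 	"""
--
-- 	vep_consequences = ["transcript_ablation", "splice_acceptor_variant", "splice_donor_variant",  "stop_gained", "frameshift_variant",
-- 						"stop_lost", "start_lost", "transcript_amplification", "inframe_insertion", "inframe_deletion", "missense_variant",
-- 						"protein_altering_variant", "splice_region_variant", "incomplete_terminal_codon_variant", "stop_retained_variant",
-- 						"synonymous_variant", "coding_sequence_variant", "mature_miRNA_variant", "5_prime_UTR_variant", "3_prime_UTR_variant",
-- 						"non_coding_transcript_exon_variant", "intron_variant", "NMD_transcript_variant", "non_coding_transcript_variant",
-- 						"upstream_gene_variant", "downstream_gene_variant", "TFBS_ablation", "TFBS_amplification", "TF_binding_site_variant",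
-- 						"regulatory_region_ablation", "regulatory_region_amplification", "feature_elongation", "regulatory_region_variant",
-- 						"feature_truncation", "intergenic_variant"]
--
-- 	consequences = []
--
-- 	for transcript in transcript_data:
--
-- 		try:
--
-- 			consequence = transcript_data[transcript]['Consequence']
--
-- 		except:
--
-- 			return "None"
--
--
-- 		if consequence != "":
--
-- 			consequence = consequence.split('&') #split when formatted like regulatory_region_amplification&feature_elongation
--
-- 			for x in consequence:
--
-- 				consequences.append(x)
--
--
-- 	if consequences == False:
--
-- 		return "None"
--
--
-- 	worst = 1000 #longer than vep_consequences
--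
-- 	for consequence in consequences:
--
-- 		index = vep_consequences.index(consequence)
--
-- 		if index < worst:
--
-- 			worst = index
--
-- 	return vep_consequences[worst]
-- ===== SOURCE B (Python) =====
-- def worst_consequence(transcript_data):
-- 	vep_consequences = ["transcript_ablation", "splice_acceptor_variant", "splice_donor_variant",  "stop_gained", "frameshift_variant",
-- 						"stop_lost", "start_lost", "transcript_amplification", "inframe_insertion", "inframe_deletion", "missense_variant",
-- 						"protein_altering_variant", "splice_region_variant", "incomplete_terminal_codon_variant", "stop_retained_variant",
-- 						"synonymous_variant", "coding_sequence_variant", "mature_miRNA_variant", "5_prime_UTR_variant", "3_prime_UTR_variant",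
-- 						"non_coding_transcript_exon_variant", "intron_variant", "NMD_transcript_variant", "non_coding_transcript_variant",
-- 						"upstream_gene_variant", "downstream_gene_variant", "TFBS_ablation", "TFBS_amplification", "TF_binding_site_variant",
-- 						"regulatory_region_ablation", "regulatory_region_amplification", "feature_elongation", "regulatory_region_variant",
-- 						"feature_truncation", "intergenic_variant"]
--
-- 	seen = set()
--
-- 	for transcript in transcript_data:
--
-- 		try:
-- 			consequence = transcript_data[transcript]['Consequence']
-- 		except:
-- 			return "None"
--
-- 		if consequence != "":
-- 			seen.update(consequence.split('&'))
--
-- 	# scan the priority list once and return the first consequence present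
-- 	return next(c for c in vep_consequences if c in seen)
-- ===== Notes on version B (the rewrite author's own statement) =====
-- stated objective: alternative
-- what changed: B replaces A's minimum-index scan (list.index per consequence, then manual min and a final table indexing) by collecting the consequences into a set once and scanning the priority list vep_consequences front-to-back for the first member of that set.
import Mathlib
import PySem

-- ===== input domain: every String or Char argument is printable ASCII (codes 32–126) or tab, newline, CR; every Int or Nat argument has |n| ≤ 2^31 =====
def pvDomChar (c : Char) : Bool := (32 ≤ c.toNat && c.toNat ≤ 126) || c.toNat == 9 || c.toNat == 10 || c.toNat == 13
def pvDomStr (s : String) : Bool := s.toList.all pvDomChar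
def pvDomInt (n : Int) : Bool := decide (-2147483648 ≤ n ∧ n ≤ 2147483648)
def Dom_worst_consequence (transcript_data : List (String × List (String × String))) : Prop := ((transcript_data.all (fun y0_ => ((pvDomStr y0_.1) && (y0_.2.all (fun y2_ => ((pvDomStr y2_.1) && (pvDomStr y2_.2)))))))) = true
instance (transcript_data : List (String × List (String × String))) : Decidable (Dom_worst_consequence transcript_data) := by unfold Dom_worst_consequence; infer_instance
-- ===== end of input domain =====

-- B collects the consequences into a set once and scans the priority table for its first member,
-- instead of A's list.index-minimum scan; same return value wherever A returns (alternative, not faster).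

-- ===== PORT A =====
-- the VEP priority table, shared verbatim by both Pythons
def vepConsequences : List String :=
  ["transcript_ablation", "splice_acceptor_variant", "splice_donor_variant", "stop_gained", "frameshift_variant",
   "stop_lost", "start_lost", "transcript_amplification", "inframe_insertion", "inframe_deletion", "missense_variant",
   "protein_altering_variant", "splice_region_variant", "incomplete_terminal_codon_variant", "stop_retained_variant",
   "synonymous_variant", "coding_sequence_variant", "mature_miRNA_variant", "5_prime_UTR_variant", "3_prime_UTR_variant",
   "non_coding_transcript_exon_variant", "intron_variant", "NMD_transcript_variant", "non_coding_transcript_variant",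
   "upstream_gene_variant", "downstream_gene_variant", "TFBS_ablation", "TFBS_amplification", "TF_binding_site_variant",
   "regulatory_region_ablation", "regulatory_region_amplification", "feature_elongation", "regulatory_region_variant",
   "feature_truncation", "intergenic_variant"]

-- c.split('&'); the separator "&" is nonempty, so Str.split? never returns none
def pvSplitAmp (c : String) : List String := (PySem.Str.split? c "&").getD []

-- A's collection loop: append each '&'-separated token; `none` = the try/except fired (missing 'Consequence' key)
def pvCollectA : List (String × List (String × String)) → List String → Option (List String)
  | [], acc => some acc
  | (_, inner) :: rest, acc =>
    match (PySem.Dict.mk inner).get? "Consequence" with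
    | none => none
    | some c => pvCollectA rest (acc ++ (if c ≠ "" then pvSplitAmp c else []))

-- A's minimum scan: `worst = 1000; for c in consequences: index = vep.index(c); if index < worst: worst = index`
-- `none` = ValueError from list.index (consequence not in the table)
def pvWorstLoop (cs : List String) : Option Nat :=
  cs.foldl
    (fun ow c => ow.bind (fun w => (PySem.List.index? vepConsequences c).map (fun i => if i < w then i else w)))
    (some 1000)

def worst_consequence (transcript_data : List (String × List (String × String))) : String :=
  match pvCollectA transcript_data [] with
  | none => "None"
  | some consequences =>
    -- `if consequences == False: return "None"` — a list never equals False, dead branch in Python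
    match pvWorstLoop consequences with
    | none => ""  -- ValueError from list.index; excluded by Pre_
    | some worst => (PySem.List.pyGet? vepConsequences (worst : Int)).getD ""  -- IndexError at worst = 1000 excluded by Pre_

-- ===== PORT B =====
-- B's collection loop: same traversal, but the tokens go into a set
def pvCollectB : List (String × List (String × String)) → PySem.Set String → Option (PySem.Set String)
  | [], seen => some seen
  | (_, inner) :: rest, seen =>
    match (PySem.Dict.mk inner).get? "Consequence" with
    | none => none
    | some c => pvCollectB rest (if c ≠ "" then PySem.Set.update seen (pvSplitAmp c) else seen)

def worst_consequence_alt (transcript_data : List (String × List (String × String))) : String :=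
  match pvCollectB transcript_data PySem.Set.empty with
  | none => "None"
  | some seen =>
    -- next(c for c in vep_consequences if c in seen); StopIteration (no member) excluded by Pre_
    (vepConsequences.find? (fun c => PySem.Set.contains seen c)).getD ""

-- ===== PRECONDITION & SPEC =====
-- the flat list of '&'-separated consequence tokens A collects (empty-string values contribute nothing)
def pvFlatConsequences (transcript_data : List (String × List (String × String))) : List String :=
  transcript_data.flatMap (fun t =>
    match (PySem.Dict.mk t.2).get? "Consequence" with
    | none => []
    | some c => if c ≠ "" then pvSplitAmp c else [])

-- Pre_ excludes exactly the inputs where A raises: IndexError (no consequence collected, vep_consequences[1000])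
-- or ValueError (a token not in the table). A returns everywhere else, including the early-return "None" case.
def Pre_worst_consequence (transcript_data : List (String × List (String × String))) : Prop :=
  (∃ t ∈ transcript_data, (PySem.Dict.mk t.2).get? "Consequence" = none) ∨
  (pvFlatConsequences transcript_data ≠ [] ∧ ∀ c ∈ pvFlatConsequences transcript_data, c ∈ vepConsequences)
instance (transcript_data : List (String × List (String × String))) : Decidable (Pre_worst_consequence transcript_data) := by
  unfold Pre_worst_consequence; infer_instance

def pvWitness_worst_consequence : (List (String × List (String × String))) :=
  [("t1", [("Consequence", "stop_gained")]), ("t2", [("Consequence", "missense_variant&intron_variant")])]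

def Spec_worst_consequence (transcript_data : List (String × List (String × String))) (out : String) : Prop := out = worst_consequence_alt transcript_data
instance (transcript_data : List (String × List (String × String))) (out : String) : Decidable (Spec_worst_consequence transcript_data out) := by unfold Spec_worst_consequence; infer_instance

-- ===== CLAIM (what is proved, stated in full; the proofs are below) =====
def Claim_equal_worst_consequence : Prop := ∀ (transcript_data : List (String × List (String × String))), Dom_worst_consequence transcript_data → Pre_worst_consequence transcript_data → Spec_worst_consequence transcript_data (worst_consequence transcript_data)
-- ===== LEMMAS AND PROOFS =====

lemma pvCollectA_eq_none {td : List (String × List (String × String))} (acc : List String)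
    (h : ∃ t ∈ td, (PySem.Dict.mk t.2).get? "Consequence" = none) :
    pvCollectA td acc = none := by
  induction td generalizing acc with
  | nil => simp at h
  | cons t rest ih =>
    obtain ⟨u, hu, hnone⟩ := h
    simp only [pvCollectA]
    rcases List.mem_cons.mp hu with rfl | hu'
    · simp [hnone]
    · cases hg : (PySem.Dict.mk t.2).get? "Consequence" with
      | none => rfl
      | some c => exact ih _ ⟨u, hu', hnone⟩

lemma pvCollectA_eq_some {td : List (String × List (String × String))} (acc : List String)
    (h : ¬ ∃ t ∈ td, (PySem.Dict.mk t.2).get? "Consequence" = none) :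
    pvCollectA td acc = some (acc ++ pvFlatConsequences td) := by
  induction td generalizing acc with
  | nil => simp [pvCollectA, pvFlatConsequences]
  | cons t rest ih =>
    push Not at h
    cases hg : (PySem.Dict.mk t.2).get? "Consequence" with
    | none => exact absurd hg (h t (List.mem_cons_self ..))
    | some c =>
      have h' : ¬ ∃ u ∈ rest, (PySem.Dict.mk u.2).get? "Consequence" = none := by
        push Not; exact fun u hu => h u (List.mem_cons_of_mem _ hu)
      simp only [pvCollectA, hg, ih _ h', pvFlatConsequences, List.flatMap_cons]
      simp [List.append_assoc]

lemma pvCollectB_eq_none {td : List (String × List (String × String))} (s : PySem.Set String)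
    (h : ∃ t ∈ td, (PySem.Dict.mk t.2).get? "Consequence" = none) :
    pvCollectB td s = none := by
  induction td generalizing s with
  | nil => simp at h
  | cons t rest ih =>
    obtain ⟨u, hu, hnone⟩ := h
    simp only [pvCollectB]
    rcases List.mem_cons.mp hu with rfl | hu'
    · simp [hnone]
    · cases hg : (PySem.Dict.mk t.2).get? "Consequence" with
      | none => rfl
      | some c => exact ih _ ⟨u, hu', hnone⟩

lemma pvCollectB_eq_some {td : List (String × List (String × String))} (s : PySem.Set String)
    (h : ¬ ∃ t ∈ td, (PySem.Dict.mk t.2).get? "Consequence" = none) :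
    pvCollectB td s = some (PySem.Set.update s (pvFlatConsequences td)) := by
  induction td generalizing s with
  | nil => simp [pvCollectB, pvFlatConsequences, PySem.Set.update_nil]
  | cons t rest ih =>
    push Not at h
    cases hg : (PySem.Dict.mk t.2).get? "Consequence" with
    | none => exact absurd hg (h t (List.mem_cons_self ..))
    | some c =>
      have h' : ¬ ∃ u ∈ rest, (PySem.Dict.mk u.2).get? "Consequence" = none := by
        push Not; exact fun u hu => h u (List.mem_cons_of_mem _ hu)
      simp only [pvCollectB, hg, ih _ h', pvFlatConsequences, List.flatMap_cons]
      by_cases hc : c = ""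
      · simp [hc]
      · simp [hc, PySem.Set.update_append]

-- invariant of A's minimum scan: the fold returns the least table index among the consequences (or the seed)
lemma pvWorstLoop_go (cs : List String) (w0 : Nat) (hsub : ∀ c ∈ cs, c ∈ vepConsequences) :
    ∃ w, cs.foldl
      (fun ow c => ow.bind (fun w => (PySem.List.index? vepConsequences c).map (fun i => if i < w then i else w)))
      (some w0) = some w ∧ w ≤ w0 ∧
      (w = w0 ∨ ∃ c ∈ cs, PySem.List.index? vepConsequences c = some w) ∧
      (∀ c ∈ cs, ∀ i, PySem.List.index? vepConsequences c = some i → w ≤ i) := by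
  induction cs generalizing w0 with
  | nil => exact ⟨w0, rfl, le_refl _, Or.inl rfl, by simp⟩
  | cons c cs ih =>
    have hc : c ∈ vepConsequences := hsub c (List.mem_cons_self ..)
    obtain ⟨i, hi⟩ := Option.isSome_iff_exists.mp ((PySem.List.index?_isSome_iff _ _).mpr hc)
    obtain ⟨w, hw, hle, horig, hbound⟩ := ih (if i < w0 then i else w0) (fun d hd => hsub d (List.mem_cons_of_mem _ hd))
    refine ⟨w, ?_, ?_, ?_, ?_⟩
    · simpa only [List.foldl_cons, hi, Option.bind_some, Option.map_some] using hw
    · exact le_trans hle (by split <;> omega)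
    · rcases horig with h | ⟨d, hd, hidx⟩
      · by_cases hlt : i < w0
        · exact Or.inr ⟨c, List.mem_cons_self .., by rw [hi, h, if_pos hlt]⟩
        · simp only [if_neg hlt] at h; exact Or.inl h
      · exact Or.inr ⟨d, List.mem_cons_of_mem _ hd, hidx⟩
    · intro d hd j hj
      rcases List.mem_cons.mp hd with rfl | hd'
      · have : i = j := by rw [hi] at hj; exact Option.some.inj hj
        subst this
        exact le_trans hle (by split <;> omega)
      · exact hbound d hd' j hj

-- ===== VERDICT (by name: the statement is the Claim_ definition above) =====
theorem worst_consequence_spec : Claim_equal_worst_consequence := by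
  intro td _ hpre
  unfold Spec_worst_consequence worst_consequence worst_consequence_alt
  by_cases hmiss : ∃ t ∈ td, (PySem.Dict.mk t.2).get? "Consequence" = none
  · rw [pvCollectA_eq_none [] hmiss, pvCollectB_eq_none _ hmiss]
  · obtain ⟨hne, hall⟩ := hpre.resolve_left hmiss
    rw [pvCollectA_eq_some [] hmiss, pvCollectB_eq_some _ hmiss]
    simp only [List.nil_append]
    set cs := pvFlatConsequences td with hcs
    obtain ⟨w, hw, hle, horig, hbound⟩ := pvWorstLoop_go cs 1000 hall
    -- the seed 1000 is beaten: cs is nonempty and every table index is < 35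
    obtain ⟨c0, hc0⟩ := List.exists_mem_of_ne_nil cs hne
    obtain ⟨i0, hi0⟩ := Option.isSome_iff_exists.mp ((PySem.List.index?_isSome_iff _ _).mpr (hall c0 hc0))
    have hi0' := hi0
    rw [PySem.List.index?_eq_idxOf?] at hi0'
    obtain ⟨hi0lt, -, -⟩ := List.idxOf?_eq_some_iff.mp hi0'
    have hwlt : w < vepConsequences.length := lt_of_le_of_lt (hbound c0 hc0 i0 hi0) hi0lt
    have hlen : vepConsequences.length = 35 := rfl
    obtain ⟨c, hcmem, hcidx⟩ := horig.resolve_left (by omega)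
    rw [PySem.List.index?_eq_idxOf?] at hcidx
    obtain ⟨hwlen, hvw, -⟩ := List.idxOf?_eq_some_iff.mp hcidx
    -- no earlier table entry occurs among the consequences
    have hnotbefore : ∀ j, ∀ hj : j < w, vepConsequences[j]'(by omega) ∉ cs := by
      intro j hj hmem
      obtain ⟨k, hk⟩ := Option.isSome_iff_exists.mp ((PySem.List.index?_isSome_iff _ _).mpr (hall _ hmem))
      have hk' := hk
      rw [PySem.List.index?_eq_idxOf?] at hk'
      obtain ⟨hklen, hvk, hkfirst⟩ := List.idxOf?_eq_some_iff.mp hk'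
      have hkj : k ≤ j := by
        by_contra hgt
        exact hkfirst j (by omega) rfl
      have := hbound _ hmem k hk
      omega
    rw [pvWorstLoop, hw]
    -- B's scan stops exactly at index w
    have hfind : vepConsequences.find? (fun c => PySem.Set.contains (PySem.Set.update PySem.Set.empty cs) c)
        = some (vepConsequences[w]'hwlen) := by
      refine List.find?_eq_some_iff_getElem.mpr ⟨?_, w, hwlen, rfl, ?_⟩
      · rw [PySem.Set.contains_iff, PySem.Set.mem_update]
        exact Or.inr (hvw ▸ hcmem)
      · intro j hj
        simp only [Bool.not_eq_eq_eq_not, Bool.not_true]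
        rw [← Bool.not_eq_true, PySem.Set.contains_iff, PySem.Set.mem_update]
        rintro (h | h)
        · simp [PySem.Set.empty] at h
        · exact hnotbefore j hj h
    rw [hfind]
    show (PySem.List.pyGet? vepConsequences (w : Int)).getD "" = _
    rw [PySem.List.pyGet?_natCast, List.getElem?_eq_getElem hwlen]
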